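-- pv_equiv track=rewrite | github.com/panky2202/scrapy-dev | data_scraping/azure_scraping/function_ocr_product_parser/scrapers/documents/she_makeup/pdf.py | get_layout
-- ===== SOURCE A (Python) =====
-- def get_layout(ocr):
--     """
--     Return what kind of layout is being parsed: table, images or images_wprice
--     >>> get_layout([
--     ... ('LOL_INTERNET', 1, 1, 1, 1),
--     ... ('UPC', 2, 2, 2, 2),
--     ... ('Garbage', 3, 3, 3, 3),
--     ... ])
--     'table'
--     >>> get_layout([
--     ... ('S.he', 1, 1, 1, 1),
--     ... ('Prod1', 2, 2, 2, 2),
--     ... ('$1.99', 3, 3, 3, 3),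
--     ... ])
--     'images_wprice'
--     >>> get_layout([
--     ... ('S.he', 1, 1, 1, 1),
--     ... ('LOLinternet', 2, 2, 2, 2),
--     ... ('Foo', 3, 3, 3, 3),
--     ... ])
--     'images'
--     """
--     layout = ''
--     for text, left, top, width, height in ocr:
--         if text == 'UPC':
--             return 'table'
--
--         if text == 'S.he':
--             layout = 'images'
--
--         if layout == 'images' and '$' in text:
--             return 'images_wprice'
--
--     return layout
-- ===== SOURCE B (Python) =====
-- def get_layout(ocr):
--     toks = [item[0] for item in ocr]
--     n = len(toks)
--     i_upc = next((i for i, t in enumerate(toks) if t == 'UPC'), n)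
--     i_she = next((i for i, t in enumerate(toks) if t == 'S.he'), n)
--     i_dol = next((i for i, t in enumerate(toks) if i_she < i and '$' in t), n)
--     if i_upc < i_dol:
--         return 'table'
--     if i_dol < i_upc:
--         return 'images_wprice'
--     return 'images' if i_she < n else ''
-- ===== Notes on version B (the rewrite author's own statement) =====
-- stated objective: alternative
-- what changed: Replaces A's single running-flag state-machine pass with materializing the token list and computing three first-occurrence indices (first 'UPC', first 'S.he', first '$'-token strictly after the first 'S.he'; missing = list length), then classifying by comparing the indices.
import Mathlib
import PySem

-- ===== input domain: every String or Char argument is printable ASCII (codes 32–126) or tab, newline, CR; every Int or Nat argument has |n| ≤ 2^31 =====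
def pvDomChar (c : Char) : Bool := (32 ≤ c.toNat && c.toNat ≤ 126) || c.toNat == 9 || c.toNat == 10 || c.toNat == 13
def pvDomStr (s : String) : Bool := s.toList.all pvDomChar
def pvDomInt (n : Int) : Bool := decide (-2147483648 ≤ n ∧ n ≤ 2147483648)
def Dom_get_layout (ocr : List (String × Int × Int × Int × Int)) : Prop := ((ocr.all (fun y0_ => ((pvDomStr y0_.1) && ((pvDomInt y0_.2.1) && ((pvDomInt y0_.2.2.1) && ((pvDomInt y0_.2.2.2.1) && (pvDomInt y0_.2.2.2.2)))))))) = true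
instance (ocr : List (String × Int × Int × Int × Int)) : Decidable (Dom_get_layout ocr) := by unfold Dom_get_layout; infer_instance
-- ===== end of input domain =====

-- B replaces A's single running-flag pass by materializing the token list and comparing three
-- first-occurrence indices ('UPC', 'S.he', '$'-after-'S.he'); alternative decomposition, not faster.

-- ===== PORT A =====
-- '$' in text: single-character substring test = character membership (exact)
def pyHasDollar (t : String) : Bool := t.toList.contains '$'

def get_layout_go : List (String × Int × Int × Int × Int) → String → String
  | [], layout => layout
  | (text, _, _, _, _) :: rest, layout =>
    if text == "UPC" then "table"
    else
      let layout := if text == "S.he" then "images" else layout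
      if layout == "images" && pyHasDollar text then "images_wprice"
      else get_layout_go rest layout

def get_layout (ocr : List (String × Int × Int × Int × Int)) : String :=
  get_layout_go ocr ""

-- ===== PORT B =====
-- next((i for i, t in enumerate(toks) if p(i, t)), None)
def findIdxP (p : Nat → String → Bool) : List String → Option Nat
  | [] => none
  | t :: r => if p 0 t then some 0 else (findIdxP (fun i s => p (i + 1) s) r).map (· + 1)

def nUpc (toks : List String) : Nat :=
  (findIdxP (fun _ t => t == "UPC") toks).getD toks.length

def nShe (toks : List String) : Nat :=
  (findIdxP (fun _ t => t == "S.he") toks).getD toks.length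

def nDol (k : Int) (toks : List String) : Nat :=
  (findIdxP (fun i t => decide (k < (i : Int)) && pyHasDollar t) toks).getD toks.length

def get_layout_alt (ocr : List (String × Int × Int × Int × Int)) : String :=
  let toks := ocr.map (fun item => item.1)
  let n := toks.length
  let iUpc := nUpc toks
  let iShe := nShe toks
  let iDol := nDol (iShe : Int) toks
  if iUpc < iDol then "table"
  else if iDol < iUpc then "images_wprice"
  else if iShe < n then "images" else ""

-- ===== PRECONDITION & SPEC =====
def Spec_get_layout (ocr : List (String × Int × Int × Int × Int)) (out : String) : Prop := out = get_layout_alt ocr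
instance (ocr : List (String × Int × Int × Int × Int)) (out : String) : Decidable (Spec_get_layout ocr out) := by unfold Spec_get_layout; infer_instance

-- ===== CLAIM (what is proved, stated in full; the proofs are below) =====
def Claim_equal_get_layout : Prop := ∀ (ocr : List (String × Int × Int × Int × Int)), Dom_get_layout ocr → Spec_get_layout ocr (get_layout ocr)

-- ===== LEMMAS AND PROOFS =====

theorem findIdxP_congr (p q : Nat → String → Bool) (toks : List String)
    (h : ∀ i s, p i s = q i s) : findIdxP p toks = findIdxP q toks := by
  induction toks generalizing p q with
  | nil => rfl
  | cons t r ih =>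
    simp only [findIdxP, h]

theorem nUpc_cons (t : String) (r : List String) :
    nUpc (t :: r) = if t == "UPC" then 0 else nUpc r + 1 := by
  unfold nUpc
  simp only [findIdxP]
  cases t == "UPC" with
  | true => simp
  | false =>
    simp only [if_false, Bool.false_eq_true]
    cases h : findIdxP (fun _ t => t == "UPC") r <;> simp [h, List.length_cons]

theorem nShe_cons (t : String) (r : List String) :
    nShe (t :: r) = if t == "S.he" then 0 else nShe r + 1 := by
  unfold nShe
  simp only [findIdxP]
  cases t == "S.he" with
  | true => simp
  | false =>
    simp only [if_false, Bool.false_eq_true]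
    cases h : findIdxP (fun _ t => t == "S.he") r <;> simp [h, List.length_cons]

theorem nDol_cons (k : Int) (t : String) (r : List String) :
    nDol k (t :: r) = if decide (k < 0) && pyHasDollar t then 0 else nDol (k - 1) r + 1 := by
  unfold nDol
  simp only [findIdxP, Nat.cast_zero]
  cases hd : (decide (k < 0) && pyHasDollar t) with
  | true => simp [hd]
  | false =>
    simp only [hd, if_false, Bool.false_eq_true]
    rw [findIdxP_congr _ (fun i t => decide (k - 1 < (i : Int)) && pyHasDollar t) r
      (by
        intro i s
        have h : (k < ((i + 1 : Nat) : Int)) ↔ (k - 1 < (i : Int)) := by push_cast; omega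
        simp [h])]
    cases h : findIdxP (fun i t => decide (k - 1 < (i : Int)) && pyHasDollar t) r <;>
      simp [h, List.length_cons]

theorem nDol_neg (k k' : Int) (toks : List String) (hk : k < 0) (hk' : k' < 0) :
    nDol k toks = nDol k' toks := by
  induction toks generalizing k k' with
  | nil => rfl
  | cons t r ih =>
    rw [nDol_cons, nDol_cons, decide_eq_true hk, decide_eq_true hk',
      ih (k - 1) (k' - 1) (by omega) (by omega)]

-- B's computation on the token list, with an initial "S.he already seen" flag b
def classifyC (toks : List String) (b : Bool) : String :=
  let n := toks.length
  let k : Int := if b then -1 else (nShe toks : Int)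
  let iUpc := nUpc toks
  let iDol := nDol k toks
  if iUpc < iDol then "table"
  else if iDol < iUpc then "images_wprice"
  else if b || decide (nShe toks < n) then "images" else ""

theorem cmp_shift (u d : Nat) (e e' : String) (hs : e = e') :
    (if u + 1 < d + 1 then "table"
      else if d + 1 < u + 1 then "images_wprice" else e) =
    (if u < d then "table" else if d < u then "images_wprice" else e') := by
  subst hs
  simp [Nat.add_lt_add_iff_right]

theorem classifyC_upc (r : List String) (b : Bool) :
    classifyC ("UPC" :: r) b = "table" := by
  have hnd : pyHasDollar "UPC" = false := by decide
  cases b <;>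
    simp [classifyC, nUpc_cons, nShe_cons, nDol_cons, hnd, Nat.zero_lt_succ]

theorem classifyC_true_nodollar (t : String) (r : List String)
    (hu : (t == "UPC") = false) (hnd : pyHasDollar t = false) :
    classifyC (t :: r) true = classifyC r true := by
  simp only [classifyC, nUpc_cons, nDol_cons, hu, hnd, Bool.and_false, Bool.false_eq_true,
    if_false, if_true, List.length_cons, Bool.true_or]
  rw [nDol_neg (-1 - 1) (-1) r (by omega) (by omega)]
  exact cmp_shift _ _ _ _ rfl

theorem classifyC_true_dollar (t : String) (r : List String)
    (hu : (t == "UPC") = false) (hnd : pyHasDollar t = true) :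
    classifyC (t :: r) true = "images_wprice" := by
  simp [classifyC, nUpc_cons, nDol_cons, hu, hnd, Nat.zero_lt_succ]

theorem classifyC_false_she (r : List String) (hu : (("S.he" : String) == "UPC") = false) :
    classifyC ("S.he" :: r) false = classifyC r true := by
  have hnd : pyHasDollar "S.he" = false := by decide
  simp only [classifyC, nUpc_cons, nShe_cons, nDol_cons, hu, beq_self_eq_true, if_true, if_false,
    Bool.false_eq_true, hnd, Bool.and_false, List.length_cons, Bool.false_or, Bool.true_or,
    Nat.cast_zero]
  rw [nDol_neg ((0 : Int) - 1) (-1) r (by omega) (by omega)]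
  refine cmp_shift _ _ _ _ ?_
  simp

theorem classifyC_false_other (t : String) (r : List String)
    (hu : (t == "UPC") = false) (hs : (t == "S.he") = false) :
    classifyC (t :: r) false = classifyC r false := by
  simp only [classifyC, nUpc_cons, nShe_cons, nDol_cons, hu, hs, if_false, Bool.false_eq_true,
    List.length_cons, Bool.false_or]
  have hk : decide (((nShe r + 1 : Nat) : Int) < 0) = false := by
    simp only [decide_eq_false_iff_not]
    push_cast
    omega
  rw [hk]
  simp only [Bool.false_and, Bool.false_eq_true, if_false]
  have harith : ((nShe r + 1 : Nat) : Int) - 1 = ((nShe r : Nat) : Int) := by push_cast; ring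
  rw [harith]
  refine cmp_shift _ _ _ _ ?_
  simp [Nat.add_lt_add_iff_right]

theorem main_lemma (ocr : List (String × Int × Int × Int × Int)) (b : Bool) :
    get_layout_go ocr (if b then "images" else "") =
      classifyC (ocr.map (fun item => item.1)) b := by
  induction ocr generalizing b with
  | nil =>
    cases b <;> simp [get_layout_go, classifyC, nUpc, nShe, nDol, findIdxP]
  | cons hd r ih =>
    obtain ⟨text, l, tp, w, h⟩ := hd
    simp only [List.map_cons, get_layout_go]
    by_cases hu : text = "UPC"
    · subst hu
      simp [classifyC_upc]
    · have hu' : (text == "UPC") = false := by simp [hu]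
      simp only [hu', Bool.false_eq_true, if_false]
      by_cases hs : text = "S.he"
      · subst hs
        have hnd : pyHasDollar "S.he" = false := by decide
        simp only [beq_self_eq_true, if_true, hnd, Bool.and_false, Bool.false_eq_true, if_false,
          ite_self]
        cases b with
        | true =>
          have := ih true
          simp only [if_true] at this
          rw [this, classifyC_true_nodollar "S.he" _ hu' hnd]
        | false =>
          have := ih true
          simp only [if_true] at this
          rw [this, classifyC_false_she _ hu']
      · have hs' : (text == "S.he") = false := by simp [hs]
        simp only [hs', Bool.false_eq_true, if_false]
        cases b with
        | true =>
          simp only [if_true, beq_self_eq_true, Bool.true_and]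
          cases hdol : pyHasDollar text with
          | true =>
            simp only [if_true]
            rw [classifyC_true_dollar text _ hu' hdol]
          | false =>
            simp only [Bool.false_eq_true, if_false]
            have := ih true
            simp only [if_true] at this
            rw [this, classifyC_true_nodollar text _ hu' hdol]
        | false =>
          simp only [if_false, Bool.false_eq_true]
          have hne : (("" : String) == "images") = false := by decide
          simp only [hne, Bool.false_and, Bool.false_eq_true, if_false]
          have := ih false
          simp only [if_false, Bool.false_eq_true] at this
          rw [this, classifyC_false_other text _ hu' hs']

theorem alt_eq_classifyC (ocr : List (String × Int × Int × Int × Int)) :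
    get_layout_alt ocr = classifyC (ocr.map (fun item => item.1)) false := by
  simp [get_layout_alt, classifyC]

-- ===== VERDICT (by name: the statement is the Claim_ definition above) =====
theorem get_layout_spec : Claim_equal_get_layout := by
  intro ocr _
  unfold Spec_get_layout get_layout
  rw [alt_eq_classifyC]
  have := main_lemma ocr false
  simpa using this
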